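-- pv_equiv track=rewrite | github.com/guy-asaert/aoc_2022 | day_18/main_v2.py | touching_cubes
-- ===== SOURCE A (Python) =====
-- from collections import namedtuple, defaultdict
--
-- def touching_cubes(axis1, axis2, axis3):
--
--     cubes = defaultdict(lambda: defaultdict(list))
--
--     for x, y, z in zip(axis1, axis2, axis3):
--         cubes[x][y].append(z)
--
--     # find touching cubes
--     touching_cubes = 0
--     for x in cubes:
--         for y in cubes[x]:
--             z_coordinates = sorted(cubes[x][y])
--             for i in range(1, len(z_coordinates)):
--                 if z_coordinates[i] - z_coordinates[i - 1] == 1: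
--                     touching_cubes += 1
--     return touching_cubes
-- ===== SOURCE B (Python) =====
-- def touching_cubes(axis1, axis2, axis3):
--     cubes = set(zip(axis1, axis2, axis3))
--     count = 0
--     for x, y, z in cubes:
--         if (x, y, z - 1) in cubes:
--             count += 1
--     return count
-- ===== Notes on version B (the rewrite author's own statement) =====
-- stated objective: alternative
-- what changed: Replaces the nested defaultdict grouping plus per-column sort and adjacent-difference scan by a single hash set of cube triples and one pass counting cubes whose z-1 neighbour in the same (x,y) column is also in the set.
import Mathlib
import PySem

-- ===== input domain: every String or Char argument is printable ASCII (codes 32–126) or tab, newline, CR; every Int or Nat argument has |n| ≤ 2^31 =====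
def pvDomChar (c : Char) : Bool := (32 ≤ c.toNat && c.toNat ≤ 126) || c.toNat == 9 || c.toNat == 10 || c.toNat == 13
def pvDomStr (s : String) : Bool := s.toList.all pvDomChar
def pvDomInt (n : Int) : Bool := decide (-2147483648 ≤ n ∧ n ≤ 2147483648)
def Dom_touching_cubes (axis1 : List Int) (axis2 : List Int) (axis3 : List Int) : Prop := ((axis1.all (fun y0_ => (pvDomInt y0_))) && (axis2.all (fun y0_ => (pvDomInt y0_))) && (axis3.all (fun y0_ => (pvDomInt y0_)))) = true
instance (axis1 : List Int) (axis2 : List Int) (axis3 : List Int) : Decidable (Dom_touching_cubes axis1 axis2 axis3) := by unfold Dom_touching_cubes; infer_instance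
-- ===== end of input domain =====

-- B replaces A's nested-defaultdict grouping + per-column sort + adjacent-difference scans
-- by one set of cube triples and a single membership-counting pass (objective: alternative algorithm).

-- ===== PORT A =====
def touching_cubes (axis1 : List Int) (axis2 : List Int) (axis3 : List Int) : Int :=
  -- cubes = defaultdict(lambda: defaultdict(list)); for x, y, z in zip(...): cubes[x][y].append(z)
  let cubes : PySem.Dict Int (PySem.Dict Int (List Int)) :=
    (axis1.zip (axis2.zip axis3)).foldl
      (fun d t => d.modify t.1 PySem.Dict.empty
        (fun inner => inner.modify t.2.1 [] (fun zs => zs ++ [t.2.2])))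
      PySem.Dict.empty
  -- for x in cubes: for y in cubes[x]: z_coordinates = sorted(cubes[x][y]); range scan
  cubes.keys.foldl (fun acc x =>
    (cubes.getD x PySem.Dict.empty).keys.foldl (fun acc2 y =>
      let zc := PySem.List.sorted ((cubes.getD x PySem.Dict.empty).getD y []) (fun z => z) false
      (PySem.List.pyRange 1 (PySem.List.len zc) 1).foldl
        (fun c i => if PySem.List.pyGetD zc i 0 - PySem.List.pyGetD zc (i - 1) 0 = 1 then c + 1 else c)
        acc2)
      acc)
    0

-- ===== PORT B =====
def touching_cubes_alt (axis1 : List Int) (axis2 : List Int) (axis3 : List Int) : Int :=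
  -- cubes = set(zip(...)); count cubes whose (x, y, z-1) neighbour is in the set
  -- (the for-loop over the set is a 0/1 sum, independent of Python's set iteration order)
  let cubes : PySem.Set (Int × Int × Int) := PySem.Set.ofList (axis1.zip (axis2.zip axis3))
  cubes.foldl (fun count t =>
    if PySem.Set.contains cubes (t.1, t.2.1, t.2.2 - 1) then count + 1 else count) 0

-- ===== PRECONDITION & SPEC =====
def Spec_touching_cubes (axis1 : List Int) (axis2 : List Int) (axis3 : List Int) (out : Int) : Prop := out = touching_cubes_alt axis1 axis2 axis3
instance (axis1 : List Int) (axis2 : List Int) (axis3 : List Int) (out : Int) : Decidable (Spec_touching_cubes axis1 axis2 axis3 out) := by unfold Spec_touching_cubes; infer_instance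

-- ===== CLAIM (what is proved, stated in full; the proofs are below) =====
def Claim_equal_touching_cubes : Prop := ∀ (axis1 : List Int) (axis2 : List Int) (axis3 : List Int), Dom_touching_cubes axis1 axis2 axis3 → Spec_touching_cubes axis1 axis2 axis3 (touching_cubes axis1 axis2 axis3)

-- ===== LEMMAS AND PROOFS =====

-- Proof-side abbreviations
def pvZsl (l : List (Int × Int × Int)) (x y : Int) : List Int :=
  ((l.filter (fun t => t.1 == x)).filter (fun t => t.2.1 == y)).map (fun t => t.2.2)

def pvColCard (l : List (Int × Int × Int)) (x y : Int) : Nat :=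
  (((pvZsl l x y).toFinset).filter (fun z => z - 1 ∈ (pvZsl l x y).toFinset)).card

def pvS (l : List (Int × Int × Int)) : Finset (Int × Int × Int) :=
  l.toFinset.filter (fun t => (t.1, t.2.1, t.2.2 - 1) ∈ l.toFinset)

def pvAdjCnt : List Int → Nat
  | [] => 0
  | [_] => 0
  | a :: b :: t => (if b - a = 1 then 1 else 0) + pvAdjCnt (b :: t)

-- (1) the outer dict's entry at x is the inner fold over the triples with first coordinate x
theorem pv_getD_build (l : List (Int × Int × Int)) (x : Int) :
    (l.foldl (fun d t => d.modify t.1 PySem.Dict.empty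
        (fun inner => inner.modify t.2.1 [] (fun zs => zs ++ [t.2.2]))) PySem.Dict.empty).getD x PySem.Dict.empty
    = (l.filter (fun t => t.1 == x)).foldl
        (fun d t => d.modify t.2.1 [] (fun zs => zs ++ [t.2.2])) PySem.Dict.empty := by
  induction l using List.reverseRecOn with
  | nil => simp
  | append_singleton l t ih =>
      rw [List.foldl_append, List.filter_append]
      simp only [List.foldl_cons, List.foldl_nil, PySem.Dict.getD_modify]
      by_cases h : x = t.1
      · subst h
        simp [List.foldl_append, ih]
      · simp [if_neg h, show ¬ (t.1 = x) from fun hh => h hh.symm, ih]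

-- (2) the inner dict's entry at y is the z-list of column (x-filtered input, y)
theorem pv_getD_inner (m : List (Int × Int × Int)) (y : Int) :
    ((m.foldl (fun d t => d.modify t.2.1 [] (fun zs => zs ++ [t.2.2])) PySem.Dict.empty).getD y [])
    = (m.filter (fun t => t.2.1 == y)).map (fun t => t.2.2) := by
  have h := PySem.Dict.getD_foldl_modify_append (m.map (fun t => (t.2.1, t.2.2))) PySem.Dict.empty y
  rw [List.foldl_map] at h
  simpa [List.filter_map, Function.comp] using h

-- (3) outer keys
theorem pv_keys_build (l : List (Int × Int × Int)) :
    (l.foldl (fun d t => d.modify t.1 PySem.Dict.empty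
        (fun inner => inner.modify t.2.1 [] (fun zs => zs ++ [t.2.2]))) PySem.Dict.empty).keys
    = PySem.Set.ofList (l.map (fun t => t.1)) := by
  have h := PySem.Dict.keys_foldl_modify_key l (fun t => t.1) PySem.Dict.empty
      (fun d t inner => inner.modify t.2.1 [] (fun zs => zs ++ [t.2.2])) PySem.Dict.empty
  simpa [PySem.Set.update, PySem.Set.ofList] using h

-- (4) inner keys
theorem pv_keys_inner (m : List (Int × Int × Int)) :
    ((m.foldl (fun d t => d.modify t.2.1 [] (fun zs => zs ++ [t.2.2])) PySem.Dict.empty).keys)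
    = PySem.Set.ofList (m.map (fun t => t.2.1)) := by
  have h := PySem.Dict.keys_foldl_modify_key m (fun t => t.2.1) ([] : List Int)
      (fun d t zs => zs ++ [t.2.2]) PySem.Dict.empty
  simpa [PySem.Set.update, PySem.Set.ofList] using h

-- (5) the index scan counts adjacent differences of 1
theorem pv_cnt_getD (zc : List Int) :
    List.countP (fun k => decide (zc.getD (k + 1) 0 - zc.getD k 0 = 1)) (List.range (zc.length - 1))
    = pvAdjCnt zc := by
  match zc with
  | [] => simp [pvAdjCnt]
  | [a] => simp [pvAdjCnt]
  | a :: b :: t =>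
      have ih := pv_cnt_getD (b :: t)
      simp only [List.length_cons, Nat.add_sub_cancel] at *
      rw [List.range_succ_eq_map, List.countP_cons, List.countP_map]
      simp only [List.getD_cons_succ, List.getD_cons_zero, pvAdjCnt]
      rw [show ((fun k => decide ((b :: t).getD k 0 - (a :: b :: t).getD k 0 = 1)) ∘ Nat.succ)
            = (fun k => decide ((b :: t).getD (k + 1) 0 - (b :: t).getD k 0 = 1)) from
          funext (fun k => by simp [Function.comp])]
      rw [ih]
      by_cases h : b - a = 1 <;> simp [h, Nat.add_comm]

theorem pv_range_loop (zc : List Int) (acc : Int) :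
    (PySem.List.pyRange 1 (PySem.List.len zc) 1).foldl
        (fun c i => if PySem.List.pyGetD zc i 0 - PySem.List.pyGetD zc (i - 1) 0 = 1 then c + 1 else c) acc
    = acc + (pvAdjCnt zc : Int) := by
  have h := PySem.List.foldl_count_if
      (fun i => decide (PySem.List.pyGetD zc i 0 - PySem.List.pyGetD zc (i - 1) 0 = 1))
      (PySem.List.pyRange 1 (PySem.List.len zc) 1) acc
  simp only [decide_eq_true_eq] at h
  rw [h]
  congr 1
  rw [PySem.List.pyRange_one, List.countP_map]
  rw [← pv_cnt_getD zc]
  have hlen : ((PySem.List.len zc - 1).toNat) = zc.length - 1 := by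
    simp [PySem.List.len_eq]
  rw [hlen]
  congr 1
  apply List.countP_congr
  intro k hk
  have h1 : (1 : Int) + (k : Int) = ((k + 1 : Nat) : Int) := by push_cast; ring
  have h2 : ((k + 1 : Nat) : Int) - 1 = ((k : Nat) : Int) := by push_cast; ring
  simp only [Function.comp, h1, h2, PySem.List.pyGetD_natCast]

-- (6) on a sorted list, adjacent-difference-1 count = number of distinct z with z-1 present
theorem pv_adj_sorted (s : List Int) (hs : s.Pairwise (· ≤ ·)) :
    pvAdjCnt s = ((s.toFinset).filter (fun z => z - 1 ∈ s.toFinset)).card := by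
  match s with
  | [] => simp [pvAdjCnt]
  | [a] => simp [pvAdjCnt, Finset.filter_singleton]
  | a :: b :: t =>
      have hle : ∀ z ∈ b :: t, a ≤ z := fun z hz => (List.pairwise_cons.mp hs).1 z hz
      have htail : (b :: t).Pairwise (· ≤ ·) := (List.pairwise_cons.mp hs).2
      have ih := pv_adj_sorted (b :: t) htail
      by_cases haT : a ∈ (b :: t)
      · -- then a = b, difference 0; insert a is absorbed
        have hab : a = b := by
          rcases List.mem_cons.mp haT with h | h
          · exact h
          · exact le_antisymm (hle b List.mem_cons_self) ((List.pairwise_cons.mp htail).1 a h)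
        have : (a :: b :: t).toFinset = (b :: t).toFinset := by
          rw [List.toFinset_cons]
          exact Finset.insert_eq_self.mpr (List.mem_toFinset.mpr haT)
        rw [pvAdjCnt, this, ih]
        have : ¬ (b - a = 1) := by omega
        simp [this]
      · -- a fresh minimum
        have hlt : ∀ z ∈ (b :: t).toFinset, a < z := by
          intro z hz
          have hz' := List.mem_toFinset.mp hz
          exact lt_of_le_of_ne (hle z hz') (fun h => haT (h ▸ hz'))
        have hins : (a :: b :: t).toFinset = insert a (b :: t).toFinset := by simp
        have hnotmem : a ∉ (b :: t).toFinset := fun h => haT (List.mem_toFinset.mp h)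
        rw [pvAdjCnt, hins]
        rw [Finset.filter_insert]
        have hpa : ¬ (a - 1 ∈ insert a ((b :: t).toFinset)) := by
          intro h
          rcases Finset.mem_insert.mp h with h | h
          · omega
          · exact absurd (hlt _ h) (by omega)
        rw [if_neg hpa]
        by_cases hb1 : b = a + 1
        · have hset : ((b :: t).toFinset).filter (fun z => z - 1 ∈ insert a ((b :: t).toFinset))
              = insert b (((b :: t).toFinset).filter (fun z => z - 1 ∈ (b :: t).toFinset)) := by
            ext z
            simp only [Finset.mem_filter, Finset.mem_insert]
            constructor
            · rintro ⟨hzT, hz1⟩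
              rcases hz1 with h | h
              · left; omega
              · right; exact ⟨hzT, h⟩
            · rintro (rfl | ⟨hzT, h⟩)
              · exact ⟨by simp, Or.inl (by omega)⟩
              · exact ⟨hzT, Or.inr h⟩
          rw [hset, Finset.card_insert_of_notMem (by
            simp only [Finset.mem_filter, not_and]
            intro _
            have : b - 1 = a := by omega
            rw [this]; exact hnotmem)]
          rw [← ih]
          simp [hb1]
          omega
        · have hset : ((b :: t).toFinset).filter (fun z => z - 1 ∈ insert a ((b :: t).toFinset))
              = ((b :: t).toFinset).filter (fun z => z - 1 ∈ (b :: t).toFinset) := by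
            apply Finset.filter_congr
            intro z hz
            simp only [Finset.mem_insert]
            constructor
            · rintro (h | h)
              · exfalso
                have hbz : b ≤ z := by
                  rcases List.mem_cons.mp (List.mem_toFinset.mp hz) with rfl | hzt
                  · exact le_refl _
                  · exact (List.pairwise_cons.mp htail).1 z hzt
                have := hlt z hz
                have hab2 : a ≤ b := hle b List.mem_cons_self
                have hne : a ≠ b := fun he => haT (he ▸ List.mem_cons_self)
                omega
              · exact h
            · exact fun h => Or.inr h
          rw [hset, ← ih]
          have : ¬ (b - a = 1) := by omega
          simp [this]

theorem pv_col (l : List (Int × Int × Int)) (x y : Int) :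
    pvAdjCnt (PySem.List.sorted (pvZsl l x y) (fun z => z) false) = pvColCard l x y := by
  rw [pv_adj_sorted _ (PySem.List.sorted_pairwise (pvZsl l x y) (fun z => z)),
    List.toFinset_eq_of_perm _ _ (PySem.List.sorted_perm (pvZsl l x y) (fun z => z) false)]
  rfl

-- membership characterisation of a column's z-list
theorem pv_mem_zsl (l : List (Int × Int × Int)) (x y z : Int) :
    z ∈ pvZsl l x y ↔ (x, y, z) ∈ l := by
  simp only [pvZsl, List.mem_map, List.mem_filter, beq_iff_eq]
  constructor
  · rintro ⟨t, ⟨⟨ht, h1⟩, h2⟩, h3⟩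
    obtain ⟨tx, ty, tz⟩ := t
    simp_all
  · intro h
    exact ⟨(x, y, z), ⟨⟨h, rfl⟩, rfl⟩, rfl⟩

-- (8) fibre cardinality
theorem pv_fiber (l : List (Int × Int × Int)) (x y : Int) :
    ((pvS l).filter (fun t => (t.1, t.2.1) = (x, y))).card = pvColCard l x y := by
  apply Finset.card_bij (fun t _ => t.2.2)
  · rintro ⟨tx, ty, tz⟩ ht
    simp only [pvS, Finset.mem_filter, List.mem_toFinset, Prod.mk.injEq] at ht
    obtain ⟨⟨hmem, hpred⟩, hx, hy⟩ := ht
    subst hx; subst hy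
    simp only [Finset.mem_filter, List.mem_toFinset, pv_mem_zsl]
    exact ⟨hmem, hpred⟩
  · rintro ⟨tx, ty, tz⟩ ht ⟨ux, uy, uz⟩ hu he
    simp only [pvS, Finset.mem_filter, Prod.mk.injEq] at ht hu
    simp_all
  · intro z hz
    simp only [Finset.mem_filter, List.mem_toFinset, pv_mem_zsl] at hz
    exact ⟨(x, y, z), by simp [pvS, Finset.mem_filter, List.mem_toFinset, hz.1, hz.2], rfl⟩

-- (8') the double list sum over distinct x then distinct y equals |pvS l|
theorem pv_partition (l : List (Int × Int × Int)) :
    (((PySem.Set.ofList (l.map (fun t => t.1))).map (fun x =>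
        (((PySem.Set.ofList ((l.filter (fun t => t.1 == x)).map (fun t => t.2.1))).map (fun y =>
            pvColCard l x y)).sum))).sum)
    = (pvS l).card := by
  classical
  set XF : Finset Int := (l.map (fun t => t.1)).toFinset with hXF
  -- convert list sums to Finset sums
  have hsumX : ∀ (f : Int → Nat) (m : List Int),
      ((PySem.Set.ofList m).map f).sum = m.toFinset.sum f := by
    intro f m
    rw [← List.sum_toFinset f (PySem.Set.nodup_ofList m)]
    congr 1
    ext z
    simp [PySem.Set.mem_ofList]
  rw [hsumX]
  rw [Finset.sum_congr rfl (fun x _ => hsumX _ _)]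
  -- fiberwise decomposition
  set P : Finset (Int × Int) := XF.biUnion (fun x =>
      (((l.filter (fun t => t.1 == x)).map (fun t => t.2.1)).toFinset).image (fun y => (x, y))) with hP
  have hmaps : ∀ t ∈ pvS l, (t.1, t.2.1) ∈ P := by
    rintro ⟨tx, ty, tz⟩ ht
    simp only [pvS, Finset.mem_filter, List.mem_toFinset] at ht
    simp only [hP, Finset.mem_biUnion, Finset.mem_image, List.mem_toFinset, List.mem_map,
      List.mem_filter, hXF, beq_iff_eq]
    exact ⟨tx, ⟨(tx, ty, tz), ht.1, rfl⟩, ty, ⟨(tx, ty, tz), ⟨ht.1, rfl⟩, rfl⟩, rfl⟩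
  have hcard := Finset.card_eq_sum_card_fiberwise (f := fun t => (t.1, t.2.1)) (s := pvS l) (t := P) (fun t ht => hmaps t ht)
  rw [hcard]
  rw [Finset.sum_biUnion]
  · apply Finset.sum_congr rfl
    intro x hx
    rw [Finset.sum_image (fun y _ y' _ h => by simpa using (Prod.mk.injEq .. ▸ h : (x, y).1 = (x, y').1 ∧ (x, y).2 = (x, y').2).2)]
    apply Finset.sum_congr rfl
    intro y hy
    rw [← pv_fiber l x y]
  · -- pairwise disjoint
    intro x hx x' hx' hne
    simp only [Function.onFun]
    rw [Finset.disjoint_left]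
    intro p hp hp'
    simp only [Finset.mem_image] at hp hp'
    obtain ⟨y, _, rfl⟩ := hp
    obtain ⟨y', _, he⟩ := hp'
    obtain ⟨h1, h2⟩ := Prod.mk.injEq .. ▸ he
    exact hne h1.symm

-- (9) B's count
theorem pv_alt_card (axis1 axis2 axis3 : List Int) :
    touching_cubes_alt axis1 axis2 axis3 = ((pvS (axis1.zip (axis2.zip axis3))).card : Int) := by
  -- same l abbreviation as in the statement
  set l := axis1.zip (axis2.zip axis3) with hl
  show (PySem.Set.ofList l).foldl (fun count t =>
    if PySem.Set.contains (PySem.Set.ofList l) (t.1, t.2.1, t.2.2 - 1) then count + 1 else count) 0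
    = ((pvS l).card : Int)
  rw [PySem.List.foldl_count_if (fun t => PySem.Set.contains (PySem.Set.ofList l) (t.1, t.2.1, t.2.2 - 1)) (PySem.Set.ofList l) 0]
  rw [zero_add]
  congr 1
  rw [List.countP_eq_length_filter,
    ← List.toFinset_card_of_nodup ((PySem.Set.nodup_ofList l).filter _),
    List.toFinset_filter]
  have hto : (PySem.Set.ofList l).toFinset = l.toFinset := by
    ext z; simp [PySem.Set.mem_ofList]
  rw [hto]
  unfold pvS
  congr 1
  apply Finset.filter_congr
  intro t _
  simp [PySem.Set.mem_ofList]

-- (10) A's count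
theorem pv_a_card (axis1 axis2 axis3 : List Int) :
    touching_cubes axis1 axis2 axis3 = ((pvS (axis1.zip (axis2.zip axis3))).card : Int) := by
  simp only [touching_cubes]
  set l := axis1.zip (axis2.zip axis3) with hl
  simp only [pv_getD_build, pv_getD_inner, pv_keys_build, pv_keys_inner, pv_range_loop]
  simp only [show ∀ x y, (((l.filter (fun t => t.1 == x)).filter (fun t => t.2.1 == y)).map (fun t => t.2.2)) = pvZsl l x y from fun _ _ => rfl]
  simp only [pv_col]
  simp only [PySem.List.foldl_add]
  rw [zero_add]
  rw [← pv_partition l]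
  rw [Nat.cast_list_sum]
  rw [List.map_map]
  congr 1
  apply List.map_congr_left
  intro x _
  rw [Function.comp, Nat.cast_list_sum, List.map_map]
  rfl

-- ===== VERDICT (by name: the statement is the Claim_ definition above) =====
theorem touching_cubes_spec : Claim_equal_touching_cubes := by
  intro a1 a2 a3 _
  unfold Spec_touching_cubes
  rw [pv_a_card, pv_alt_card]
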